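-- pv_equiv track=rewrite | github.com/dylanncairns/Vital | ml/vector_ingest.py | _text_contains_any_token
-- ===== SOURCE A (Python) =====
-- def _text_contains_any_token(text: str, tokens: set[str]) -> bool:
--     if not text or not tokens:
--         return False
--     normalized = " ".join("".join(char if char.isalnum() else " " for char in text.lower()).split())
--     if not normalized:
--         return False
--     padded = f" {normalized} "
--     return any(f" {token} " in padded for token in tokens)
-- ===== SOURCE B (Python) =====
-- def _text_contains_any_token(text: str, tokens: set[str]) -> bool:
--     if not text or not tokens:
--         return False
--     # One pass over text: collect lowercased alphanumeric runs as words.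
--     words = []
--     current = []
--     for char in text:
--         c = char.lower()
--         if c.isalnum():
--             current.append(c)
--         elif current:
--             words.append("".join(current))
--             current = []
--     if current:
--         words.append("".join(current))
--     if not words:
--         return False
--     word_set = set(words)
--     for token in tokens:
--         if " " in token:
--             parts = token.split(" ")
--             if "" in parts:
--                 continue
--             n = len(parts)
--             if any(words[i:i + n] == parts for i in range(len(words) - n + 1)):
--                 return True
--         elif token in word_set:
--             return True
--     return False
-- ===== Notes on version B (the rewrite author's own statement) =====
-- stated objective: faster
-- what changed: B tokenizes the text once in a single pass into a list of lowercased alphanumeric words and answers single-word tokens by hash-set membership (multi-word tokens by a word-level sliding-window match), instead of A's building a normalized padded string and running a substring search over it for every token.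
import Mathlib
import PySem

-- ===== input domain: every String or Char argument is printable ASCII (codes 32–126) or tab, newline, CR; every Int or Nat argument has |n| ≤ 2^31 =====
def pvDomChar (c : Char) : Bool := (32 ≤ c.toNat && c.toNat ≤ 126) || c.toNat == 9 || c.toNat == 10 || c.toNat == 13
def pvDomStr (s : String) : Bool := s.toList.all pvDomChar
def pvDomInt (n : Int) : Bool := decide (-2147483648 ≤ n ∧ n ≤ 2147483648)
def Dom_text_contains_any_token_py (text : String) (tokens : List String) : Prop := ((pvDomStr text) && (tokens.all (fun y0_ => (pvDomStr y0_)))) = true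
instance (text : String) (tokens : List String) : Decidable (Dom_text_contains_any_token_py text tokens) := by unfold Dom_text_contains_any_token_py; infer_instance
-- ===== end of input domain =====

-- B replaces A's per-token substring scan over a normalized padded string by a one-pass
-- tokenization of the text into words plus word-set membership / word-level window matching.

-- ===== PORT A =====
def text_contains_any_token_py (text : String) (tokens : List String) : Bool :=
  if text == "" || tokens == [] then false
  else
    let normalized := PySem.Chars.join [' '] (PySem.Chars.split₀ ((PySem.Chars.lower text.toList).map (fun c => if PySem.Chars.isalnum c then c else ' ')))
    if normalized == [] then false
    else
      let padded := ' ' :: (normalized ++ [' '])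
      tokens.any (fun token => PySem.Chars.isIn (' ' :: (token.toList ++ [' '])) padded)

-- ===== PORT B =====
def pvStep (st : List (List Char) × List Char) (ch : Char) : List (List Char) × List Char :=
  let c := PySem.Chars.lowerChar ch
  if PySem.Chars.isalnum c then (st.1, st.2 ++ [c])
  else if st.2.isEmpty then st else (st.1 ++ [st.2], ([] : List Char))

def pvAltWords (cs : List Char) : List (List Char) :=
  let st := cs.foldl pvStep ([], [])
  if st.2.isEmpty then st.1 else st.1 ++ [st.2]

def text_contains_any_token_py_alt (text : String) (tokens : List String) : Bool :=
  if text == "" || tokens == [] then false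
  else
    let words := pvAltWords text.toList
    if words == [] then false
    else
      let wset := PySem.Set.ofList words
      tokens.any (fun token =>
        if PySem.Chars.isIn [' '] token.toList then
          let parts := PySem.Chars.splitOn token.toList [' ']
          if parts.contains ([] : List Char) then false
          else
            let n : Int := parts.length
            (PySem.List.pyRange 0 ((words.length : Int) - n + 1) 1).any
              (fun i => PySem.List.slice words (some i) (some (i + n)) == parts)
        else PySem.Set.contains wset token.toList)

-- ===== PRECONDITION & SPEC =====
def Spec_text_contains_any_token_py (text : String) (tokens : List String) (out : Bool) : Prop := out = text_contains_any_token_py_alt text tokens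
instance (text : String) (tokens : List String) (out : Bool) : Decidable (Spec_text_contains_any_token_py text tokens out) := by unfold Spec_text_contains_any_token_py; infer_instance

-- ===== CLAIM (what is proved, stated in full; the proofs are below) =====
def Claim_equal_text_contains_any_token_py : Prop := ∀ (text : String) (tokens : List String), Dom_text_contains_any_token_py text tokens → Spec_text_contains_any_token_py text tokens (text_contains_any_token_py text tokens)

-- ===== LEMMAS AND PROOFS =====
def pvG (c : Char) : Char :=
  if PySem.Chars.isalnum (PySem.Chars.lowerChar c) then PySem.Chars.lowerChar c else ' '

theorem pv_alnum_not_space (c : Char) (h : PySem.Chars.isalnum c = true) : PySem.Chars.isspace c = false := by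
  simp only [PySem.Chars.isalnum, PySem.Chars.isalpha, PySem.Chars.isdigit, PySem.Chars.isupper,
    PySem.Chars.islower, PySem.Chars.isspace, Char.le_def, UInt32.le_iff_toNat_le,
    Bool.or_eq_true, Bool.and_eq_true, decide_eq_true_eq, Char.toNat,
    Bool.or_eq_false_iff, Bool.and_eq_false_iff, decide_eq_false_iff_not] at h ⊢
  revert h
  show (65 ≤ c.val.toNat ∧ c.val.toNat ≤ 90 ∨ 97 ≤ c.val.toNat ∧ c.val.toNat ≤ 122) ∨
       48 ≤ c.val.toNat ∧ c.val.toNat ≤ 57 → _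
  intro h
  rcases h with (h|h)|h <;> omega

theorem pv_go_eq (cs : List Char) : ∀ (ws : List (List Char)) (curB : List Char),
    PySem.Chars.split₀.go (cs.map pvG) curB.reverse ws.reverse =
      (let st := cs.foldl pvStep (ws, curB);
       if st.2.isEmpty then st.1 else st.1 ++ [st.2]) := by
  induction cs with
  | nil =>
    intro ws curB
    rw [List.map_nil, PySem.Chars.split₀.go]
    cases curB <;> simp
  | cons c rest ih =>
    intro ws curB
    rw [List.map_cons, PySem.Chars.split₀.go]
    by_cases ha : PySem.Chars.isalnum (PySem.Chars.lowerChar c) = true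
    · have hs : PySem.Chars.isspace (pvG c) = false := by
        simp only [pvG, ha, if_true]; exact pv_alnum_not_space _ ha
      simp only [hs, Bool.false_eq_true, if_false]
      have : pvG c :: curB.reverse = (curB ++ [pvG c]).reverse := by simp
      rw [this, ih ws (curB ++ [pvG c])]
      simp only [List.foldl_cons, pvStep, pvG, ha, if_true]
    · have hg : pvG c = ' ' := by simp [pvG, ha]
      have hs : PySem.Chars.isspace (pvG c) = true := by rw [hg]; decide
      simp only [hs, if_true]
      by_cases hc : curB = []
      · subst hc
        simp only [List.reverse_nil, List.isEmpty_nil, if_true]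
        have := ih ws []
        simp only [List.reverse_nil] at this
        rw [this]
        simp only [List.foldl_cons, pvStep]
        simp [ha, Bool.false_eq_true]
      · have hne : (curB.reverse).isEmpty = false := by
          simp [List.isEmpty_iff, hc]
        simp only [hne, Bool.false_eq_true, if_false, List.reverse_reverse]
        have : curB :: ws.reverse = (ws ++ [curB]).reverse := by simp
        rw [this]
        have h2 := ih (ws ++ [curB]) []
        simp only [List.reverse_nil] at h2
        rw [h2]
        simp only [List.foldl_cons, pvStep]
        have hL : PySem.Chars.isalnum (PySem.Chars.lowerChar c) = false := by
          simpa using ha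
        simp [hL, List.isEmpty_iff, hc]

theorem pv_altWords_eq (cs : List Char) :
    pvAltWords cs = PySem.Chars.split₀ (cs.map pvG) := by
  have := pv_go_eq cs [] []
  simp only [List.reverse_nil] at this
  rw [pvAltWords, PySem.Chars.split₀, this]

-- every word produced by split₀ is nonempty and whitespace-free
theorem pv_split₀_go_inv (s : List Char) : ∀ (cur : List Char) (acc : List (List Char)),
    (∀ w ∈ acc, w ≠ [] ∧ ∀ c ∈ w, PySem.Chars.isspace c = false) →
    (∀ c ∈ cur, PySem.Chars.isspace c = false) →
    ∀ w ∈ PySem.Chars.split₀.go s cur acc, w ≠ [] ∧ ∀ c ∈ w, PySem.Chars.isspace c = false := by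
  induction s with
  | nil =>
    intro cur acc hacc hcur
    rw [PySem.Chars.split₀.go]
    by_cases hc : cur = []
    · subst hc; simp only [List.isEmpty_nil, if_true]
      intro w hw; exact hacc w (by simpa using hw)
    · simp only [List.isEmpty_iff, hc, if_false]
      intro w hw
      simp only [List.mem_reverse, List.mem_cons] at hw
      rcases hw with h | h
      · subst h
        exact ⟨by simpa using hc, fun c hc' => hcur c (by simpa using hc')⟩
      · exact hacc w h
  | cons c rest ih =>
    intro cur acc hacc hcur
    rw [PySem.Chars.split₀.go]
    by_cases hs : PySem.Chars.isspace c = true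
    · simp only [hs, if_true]
      by_cases hc : cur = []
      · subst hc; simp only [List.isEmpty_nil, if_true]
        exact ih [] acc hacc (by simp)
      · simp only [List.isEmpty_iff, hc, if_false]
        refine ih [] _ ?_ (by simp)
        intro w hw
        rcases List.mem_cons.mp hw with h | h
        · subst h
          exact ⟨by simpa using hc, fun c' hc' => hcur c' (by simpa using hc')⟩
        · exact hacc w h
    · simp only [hs, if_false]
      refine ih (c :: cur) acc hacc ?_
      intro c' hc'
      rcases List.mem_cons.mp hc' with h | h
      · subst h; simpa using hs
      · exact hcur c' h

theorem pv_split₀_inv (s : List Char) :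
    ∀ w ∈ PySem.Chars.split₀ s, w ≠ [] ∧ ∀ c ∈ w, PySem.Chars.isspace c = false :=
  pv_split₀_go_inv s [] [] (by simp) (by simp)

-- PySem's splitOn with separator " " is Mathlib's List.splitOn ' '
theorem pv_splitOn_go_eq (s : List Char) : ∀ (fuel : Nat) (cur : List Char) (acc : List (List Char)),
    s.length ≤ fuel →
    PySem.Chars.splitOn.go [' '] fuel s cur acc =
      acc.reverse ++ (List.splitOn ' ' s).modifyHead (fun w => cur.reverse ++ w) := by
  induction s with
  | nil =>
    intro fuel cur acc _
    cases fuel <;> (rw [PySem.Chars.splitOn.go]; simp [List.splitOn]) <;> omega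
  | cons c rest ih =>
    intro fuel cur acc hf
    cases fuel with
    | zero => simp at hf
    | succ fuel =>
      rw [PySem.Chars.splitOn.go]
      by_cases hc : c = ' '
      · subst hc
        have hp : [' '].isPrefixOf (' ' :: rest) = true := by simp [List.isPrefixOf]
        simp only [hp, if_true, List.length_singleton, List.drop_one, List.tail_cons]
        rw [ih fuel [] (cur.reverse :: acc) (by simpa using hf)]
        simp only [List.splitOn, List.splitOnP_cons, beq_self_eq_true, if_true,
          List.reverse_cons, List.reverse_nil, List.nil_append, List.append_assoc,
          List.cons_append, List.singleton_append]
        cases List.splitOnP (fun x => x == ' ') rest <;> simp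
      · have hp : [' '].isPrefixOf (c :: rest) = false := by
          simp only [List.isPrefixOf, Bool.and_eq_false_iff, beq_eq_false_iff_ne, ne_eq]
          simp [List.isPrefixOf]
          exact fun h => hc h.symm
        simp only [hp, Bool.false_eq_true, if_false]
        rw [ih fuel (c :: cur) acc (by simpa using hf)]
        simp only [List.splitOn, List.splitOnP_cons]
        have hc' : (c == ' ') = false := by simpa using hc
        simp only [hc', Bool.false_eq_true, if_false, List.modifyHead_modifyHead]
        congr 1
        cases List.splitOnP (fun x => x == ' ') rest <;> simp

theorem pv_splitOn_eq (s : List Char) :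
    PySem.Chars.splitOn s [' '] = List.splitOn ' ' s := by
  rw [PySem.Chars.splitOn, pv_splitOn_go_eq s (s.length + 1) [] [] (by omega)]
  cases h : List.splitOn ' ' s with
  | nil => exact absurd h (List.splitOnP_ne_nil _ s)
  | cons a l => simp

-- " "-prefixed flattening of the word list
def pvF (W : List (List Char)) : List Char := W.flatMap (fun w => ' ' :: w)

theorem pv_intercalate_F (W : List (List Char)) (h : W ≠ []) :
    ' ' :: List.intercalate [' '] W = pvF W := by
  induction W with
  | nil => simp at h
  | cons w W' ih =>
    cases W' with
    | nil => simp [pvF, List.intercalate]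
    | cons b L =>
      have : ' ' :: List.intercalate [' '] (b :: L) = pvF (b :: L) := ih (by simp)
      simp only [pvF, List.flatMap_cons] at this ⊢
      rw [show List.intercalate [' '] (w :: b :: L) = w ++ [' '] ++ List.intercalate [' '] (b :: L) by
        simp [List.intercalate, List.intersperse]]
      rw [← this]
      simp

theorem pv_prefixF (W : List (List Char)) : ∀ (t : List Char),
    (∀ w ∈ W, ' ' ∉ w) →
    (' ' :: (t ++ [' '])) <+: (pvF W ++ [' ']) →
    ∃ P, P ≠ [] ∧ P <+: W ∧ t = List.intercalate [' '] P := by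
  induction W with
  | nil =>
    intro t _ hp
    have := hp.length_le
    simp [pvF] at this
  | cons w W' ih =>
    intro t hinv hp
    simp only [pvF, List.flatMap_cons, List.cons_append, List.append_assoc] at hp
    rw [List.cons_prefix_cons] at hp
    obtain ⟨-, hp⟩ := hp
    by_cases hlen : t.length < w.length
    · exfalso
      have h1 : t ++ [' '] <+: w :=
        List.prefix_of_prefix_length_le hp (List.prefix_append _ _) (by simp; omega)
      exact hinv w (by simp) (h1.sublist.subset (by simp))
    · have hlen2 : w.length ≤ t.length := by omega
      have hw : w <+: t := by
        have h1 : w <+: t ++ [' '] :=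
          List.prefix_of_prefix_length_le (List.prefix_append _ _) hp (by simp; omega)
        have h2 : w = (t ++ [' ']).take w.length := List.prefix_iff_eq_take.mp h1
        rw [List.take_append_of_le_length hlen2] at h2
        exact h2 ▸ List.take_prefix _ _
      obtain ⟨t', rfl⟩ := hw
      rw [List.append_assoc, List.prefix_append_right_inj] at hp
      cases t' with
      | nil =>
        exact ⟨[w], by simp, by simp, by simp [List.intercalate]⟩
      | cons c t'' =>
        cases W' with
        | nil =>
          exfalso
          have := hp.length_le
          simp [pvF] at this
        | cons b L =>
          have hc : c = ' ' := by
            have h2 := hp.getElem (i := 0) (by simp)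
            simpa [pvF] using h2
          subst hc
          have hp' : (' ' :: (t'' ++ [' '])) <+: (pvF (b :: L) ++ [' ']) := by
            simpa [pvF, List.flatMap_cons, List.append_assoc] using hp
          obtain ⟨P', hP1, hP2, hP3⟩ := ih t'' (fun x hx => hinv x (by simp [hx])) hp'
          refine ⟨w :: P', by simp, by simpa using hP2, ?_⟩
          cases P' with
          | nil => simp at hP1
          | cons p Ps =>
            rw [show List.intercalate [' '] (w :: p :: Ps) = w ++ [' '] ++ List.intercalate [' '] (p :: Ps) by
              simp [List.intercalate, List.intersperse]]
            rw [← hP3]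
            simp

theorem pv_infix_through (w : List Char) : ∀ (r q : List Char),
    ' ' ∉ w → (' ' :: q) <:+: (w ++ r) → (' ' :: q) <:+: r := by
  induction w with
  | nil => intro r q _ h; simpa using h
  | cons c w' ih =>
    intro r q hw h
    rw [List.cons_append, List.infix_cons_iff] at h
    rcases h with h | h
    · exfalso
      rw [List.cons_prefix_cons] at h
      exact hw (h.1 ▸ List.mem_cons_self)
    · exact ih r q (fun hx => hw (List.mem_cons_of_mem _ hx)) h

theorem pv_infixF (W : List (List Char)) : ∀ (t : List Char),
    (∀ w ∈ W, w ≠ [] ∧ ' ' ∉ w) →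
    ((' ' :: (t ++ [' '])) <:+: (pvF W ++ [' ']) ↔
      ∃ P, P ≠ [] ∧ P <:+: W ∧ t = List.intercalate [' '] P) := by
  induction W with
  | nil =>
    intro t _
    constructor
    · intro h
      have := h.length_le
      simp [pvF] at this
    · rintro ⟨P, hP1, hP2, -⟩
      exact absurd (List.eq_nil_of_infix_nil hP2) hP1
  | cons w W' ih =>
    intro t hinv
    constructor
    · intro h
      have hF : pvF (w :: W') ++ [' '] = ' ' :: (w ++ (pvF W' ++ [' '])) := by
        simp [pvF]
      rw [hF, List.infix_cons_iff] at h
      rcases h with h | h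
      · obtain ⟨P, hP1, hP2, hP3⟩ := pv_prefixF (w :: W') t
          (fun x hx => (hinv x hx).2) (by rw [hF]; exact h)
        exact ⟨P, hP1, hP2.isInfix, hP3⟩
      · have h2 : (' ' :: (t ++ [' '])) <:+: (pvF W' ++ [' ']) := by
          refine pv_infix_through w _ _ (hinv w (by simp)).2 ?_
          simpa [List.append_assoc] using h
        obtain ⟨P, hP1, hP2, hP3⟩ := (ih t (fun x hx => hinv x (by simp [hx]))).mp h2
        exact ⟨P, hP1, hP2.trans (List.suffix_cons w W').isInfix, hP3⟩
    · rintro ⟨P, hP1, hP2, rfl⟩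
      obtain ⟨u, v, huv⟩ := hP2
      have hpat : ' ' :: (List.intercalate [' '] P ++ [' ']) = pvF P ++ [' '] := by
        rw [← List.cons_append, pv_intercalate_F P hP1]
      rw [hpat, ← huv]
      cases v with
      | nil =>
        refine ⟨pvF u, [], ?_⟩
        simp [pvF, List.flatMap_append]
      | cons b L =>
        refine ⟨pvF u, b ++ pvF L ++ [' '], ?_⟩
        simp [pvF, List.flatMap_append, List.append_assoc]

theorem pv_clampIdx_nonneg (n : Nat) (i : Int) (h0 : 0 ≤ i) (h1 : i.toNat ≤ n) :
    PySem.List.clampIdx n i = i.toNat := by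
  simp only [PySem.List.clampIdx, if_neg (not_lt.mpr h0)]
  omega

theorem pv_slice_any (W parts : List (List Char)) (hne : parts ≠ []) :
    ((PySem.List.pyRange 0 ((W.length : Int) - (parts.length : Int) + 1) 1).any
       (fun i => PySem.List.slice W (some i) (some (i + (parts.length : Int))) == parts)) = true
      ↔ parts <:+: W := by
  rw [List.any_eq_true]
  constructor
  · rintro ⟨i, hi, hsl⟩
    rw [PySem.List.mem_pyRange_one] at hi
    obtain ⟨hi0, hi1⟩ := hi
    have hn : 0 < parts.length := List.length_pos_iff.mpr hne
    have hle : i.toNat + parts.length ≤ W.length := by omega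
    rw [beq_iff_eq] at hsl
    rw [PySem.List.slice] at hsl
    simp only [pv_clampIdx_nonneg W.length i hi0 (by omega),
      pv_clampIdx_nonneg W.length (i + (parts.length : Int)) (by omega) (by omega)] at hsl
    have harith : ((i + (parts.length : Int)).toNat - i.toNat) = parts.length := by omega
    rw [harith] at hsl
    have hpre : parts <+: W.drop i.toNat := hsl ▸ List.take_prefix _ _
    exact hpre.isInfix.trans (List.drop_suffix _ _).isInfix
  · rintro ⟨u, v, rfl⟩
    refine ⟨(u.length : Int), ?_, ?_⟩
    · rw [PySem.List.mem_pyRange_one]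
      refine ⟨by omega, ?_⟩
      simp only [List.length_append]
      push_cast
      omega
    · rw [beq_iff_eq, PySem.List.slice]
      have e1 := pv_clampIdx_nonneg (u ++ parts ++ v).length ((u.length : Int)) (by omega)
        (by simp only [List.length_append]; omega)
      have e2 := pv_clampIdx_nonneg (u ++ parts ++ v).length ((u.length : Int) + (parts.length : Int))
        (by omega) (by simp only [List.length_append]; omega)
      simp only [Int.toNat_natCast] at e1
      have e2' : ((u.length : Int) + (parts.length : Int)).toNat = u.length + parts.length := by omega
      rw [e2'] at e2
      simp only [e1, e2]
      have e3 : u.length + parts.length - u.length = parts.length := by omega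
      rw [e3, List.append_assoc, List.drop_left, List.take_left]

theorem pv_splitOn_no_sep (t : List Char) (h : ' ' ∉ t) : List.splitOn ' ' t = [t] := by
  have := List.splitOn_intercalate [t] (by simpa using h) (by simp) (x := ' ')
  simpa [List.intercalate] using this

theorem pv_norm_nonempty (W : List (List Char)) (hinv : ∀ w ∈ W, w ≠ [] ∧ ' ' ∉ w) (hW : W ≠ []) :
    List.intercalate [' '] W ≠ [] := by
  cases W with
  | nil => simp at hW
  | cons w W' =>
    intro hE
    have hw : w ≠ [] := (hinv w (by simp)).1
    cases W' with
    | nil => exact hw (by simpa [List.intercalate] using hE)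
    | cons b L =>
      rw [show List.intercalate [' '] (w :: b :: L) = w ++ [' '] ++ List.intercalate [' '] (b :: L) by
        simp [List.intercalate, List.intersperse]] at hE
      simp at hE

theorem pv_token (W : List (List Char)) (t : List Char)
    (hW : W ≠ []) (hinv : ∀ w ∈ W, w ≠ [] ∧ ' ' ∉ w) :
    PySem.Chars.isIn (' ' :: (t ++ [' '])) (' ' :: (List.intercalate [' '] W ++ [' '])) =
      (if PySem.Chars.isIn [' '] t then
        (let parts := PySem.Chars.splitOn t [' ']
         if parts.contains ([] : List Char) then false
         else
           (PySem.List.pyRange 0 ((W.length : Int) - (parts.length : Int) + 1) 1).any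
             (fun i => PySem.List.slice W (some i) (some (i + (parts.length : Int))) == parts))
      else PySem.Set.contains (PySem.Set.ofList W) t) := by
  have hpad : ' ' :: (List.intercalate [' '] W ++ [' ']) = pvF W ++ [' '] := by
    rw [← List.cons_append, pv_intercalate_F W hW]
  rw [hpad]
  -- the infix characterisation of the A-side test
  have hA : PySem.Chars.isIn (' ' :: (t ++ [' '])) (pvF W ++ [' ']) = true ↔
      ∃ P, P ≠ [] ∧ P <:+: W ∧ t = List.intercalate [' '] P := by
    rw [PySem.Chars.isIn_iff_infix]
    exact pv_infixF W t hinv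
  -- members of an infix of W satisfy the invariant
  have hmem : ∀ (P : List (List Char)), P <:+: W → ∀ w ∈ P, w ≠ [] ∧ ' ' ∉ w :=
    fun P hP w hw => hinv w (hP.sublist.subset hw)
  by_cases hsp : PySem.Chars.isIn [' '] t = true
  · have hspc : ' ' ∈ t := by
      rw [PySem.Chars.isIn_iff_infix, List.singleton_infix_iff] at hsp
      exact hsp
    rw [if_pos hsp]
    simp only [pv_splitOn_eq]
    by_cases hnil : List.splitOn ' ' t |>.contains ([] : List Char)
    · rw [if_pos hnil]
      simp only [List.contains_iff_mem] at hnil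
      rw [← Bool.not_eq_true, hA]
      rintro ⟨P, hP1, hP2, rfl⟩
      rw [List.splitOn_intercalate P ' ' (fun l hl => (hmem P hP2 l hl).2) hP1] at hnil
      exact (hmem P hP2 [] hnil).1 rfl
    · rw [if_neg hnil]
      simp only [List.contains_iff_mem] at hnil
      have hne : List.splitOn ' ' t ≠ [] := List.splitOnP_ne_nil _ t
      rw [Bool.eq_iff_iff, hA, pv_slice_any W _ hne]
      constructor
      · rintro ⟨P, hP1, hP2, rfl⟩
        rwa [List.splitOn_intercalate P ' ' (fun l hl => (hmem P hP2 l hl).2) hP1]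
      · intro h
        exact ⟨List.splitOn ' ' t, hne, h, (List.intercalate_splitOn t ' ').symm⟩
  · rw [if_neg hsp]
    have hspc : ' ' ∉ t := by
      rw [PySem.Chars.isIn_iff_infix, List.singleton_infix_iff] at hsp
      exact hsp
    rw [Bool.eq_iff_iff, hA]
    have hset : PySem.Set.contains (PySem.Set.ofList W) t = true ↔ t ∈ W := by
      rw [PySem.Set.contains, List.contains_iff_mem, PySem.Set.mem_ofList]
    rw [hset]
    constructor
    · rintro ⟨P, hP1, hP2, rfl⟩
      have := List.splitOn_intercalate P ' ' (fun l hl => (hmem P hP2 l hl).2) hP1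
      rw [pv_splitOn_no_sep _ hspc] at this
      rw [← this] at hP2
      exact (List.singleton_infix_iff _ W).mp hP2
    · intro hmemW
      exact ⟨[t], by simp, (List.singleton_infix_iff t W).mpr hmemW, by simp [List.intercalate]⟩

theorem pv_main (text : String) (tokens : List String) :
    text_contains_any_token_py text tokens = text_contains_any_token_py_alt text tokens := by
  rw [text_contains_any_token_py, text_contains_any_token_py_alt]
  by_cases hg : (text == "" || tokens == []) = true
  · rw [if_pos hg, if_pos hg]
  · rw [if_neg hg, if_neg hg]
    have hmap : (PySem.Chars.lower text.toList).map (fun c => if PySem.Chars.isalnum c then c else ' ')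
        = text.toList.map pvG := by
      rw [PySem.Chars.lower, List.map_map]; rfl
    have hWe : pvAltWords text.toList = PySem.Chars.split₀ (text.toList.map pvG) :=
      pv_altWords_eq text.toList
    simp only [hmap, hWe]
    set W := PySem.Chars.split₀ (text.toList.map pvG) with hWdef
    have hinv : ∀ w ∈ W, w ≠ [] ∧ ' ' ∉ w := by
      intro w hw
      obtain ⟨h1, h2⟩ := pv_split₀_inv _ w hw
      refine ⟨h1, fun hc => ?_⟩
      have := h2 ' ' hc
      simp [PySem.Chars.isspace] at this
    by_cases hWnil : W = []
    · rw [hWnil]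
      simp [PySem.Chars.join, List.intercalate]
    · have hjoin : PySem.Chars.join [' '] W = List.intercalate [' '] W := rfl
      have hnorm : (PySem.Chars.join [' '] W == ([] : List Char)) = false := by
        rw [hjoin, beq_eq_false_iff_ne]
        exact pv_norm_nonempty W hinv hWnil
      have hWb : (W == ([] : List (List Char))) = false := by
        rw [beq_eq_false_iff_ne]; exact hWnil
      rw [hnorm, hWb]
      simp only [Bool.false_eq_true, if_false]
      refine PySem.List.any_congr_mem ?_
      intro token _
      exact pv_token W token.toList hWnil hinv

-- ===== VERDICT (by name: the statement is the Claim_ definition above) =====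
theorem text_contains_any_token_py_spec : Claim_equal_text_contains_any_token_py := by
  intro text tokens _
  unfold Spec_text_contains_any_token_py
  exact pv_main text tokens
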